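-- pv_equiv track=rewrite | github.com/yfq512/sensitive-words-detect | server.py | words_extend
-- ===== SOURCE A (Python) =====
-- def words_extend(words_list, nums): # 对列表临近元素重组为新元素，从而进行列表拓展
--     words_list_org = words_list.copy()
--     nums = min(len(words_list_org), nums)
--     for n in range(2, nums+1):
--         temp_list = []
--         for i in range(len(words_list_org)):
--             try:
--                 temp_word = words_list_org[i]
--                 for k in range(1,n):
--                     temp_word = temp_word + words_list_org[i+k]
--                 temp_list.append(temp_word)
--             except:
--                 continue
--         for m in temp_list:
--             words_list.append(m)
--     return words_list
-- ===== SOURCE B (Python) =====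
-- def words_extend(words_list, nums):
--     cap = min(len(words_list), nums)
--     out = list(words_list)
--     prev = list(words_list)
--     for n in range(2, cap + 1):
--         prev = [p + w for p, w in zip(prev, words_list[n - 1:])]
--         out += prev
--     return out
-- ===== Notes on version B (the rewrite author's own statement) =====
-- stated objective: faster
-- what changed: Instead of rebuilding every size-n window by an inner index loop guarded by try/except, B keeps the list of size-(n-1) window strings and extends each by one element via zip with the (n-1)-shifted list, so each round is one linear zip.
import Mathlib
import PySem

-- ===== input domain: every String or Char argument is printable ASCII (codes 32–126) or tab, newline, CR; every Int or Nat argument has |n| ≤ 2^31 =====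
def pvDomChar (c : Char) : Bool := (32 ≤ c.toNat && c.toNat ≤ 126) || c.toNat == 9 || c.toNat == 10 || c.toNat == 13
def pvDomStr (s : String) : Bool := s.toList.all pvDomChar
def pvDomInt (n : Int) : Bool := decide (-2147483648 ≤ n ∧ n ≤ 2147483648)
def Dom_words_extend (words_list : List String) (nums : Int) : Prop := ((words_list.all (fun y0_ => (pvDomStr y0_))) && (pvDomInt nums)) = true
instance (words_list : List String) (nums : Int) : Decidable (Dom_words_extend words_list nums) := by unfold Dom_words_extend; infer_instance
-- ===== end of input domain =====

-- B builds each round's window strings by extending the previous round's windows by one element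
-- (one zip per round) instead of rebuilding every window with an inner index loop guarded by
-- try/except. Equivalence is about the RETURN value only: Python A appends to its argument list
-- in place, B does not mutate it.

-- ===== PORT A =====
def words_extend (words_list : List String) (nums : Int) : List String :=
  let words_list_org := words_list
  let nums2 : Int := min (words_list_org.length : Int) nums
  (PySem.List.pyRange 2 (nums2 + 1) 1).foldl (fun acc n =>
    let temp_list := (PySem.List.pyRange 0 (words_list_org.length : Int) 1).foldl (fun tl i =>
      -- try: temp_word = org[i]; for k in range(1, n): temp_word += org[i+k]; append
      -- except: continue  — the Option models the IndexError, none = skip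
      match (PySem.List.pyGet? words_list_org i).bind (fun w0 =>
          (PySem.List.pyRange 1 n 1).foldl
            (fun ow k => ow.bind (fun w => (PySem.List.pyGet? words_list_org (i + k)).map (fun x => w ++ x)))
            (some w0)) with
      | some w => tl ++ [w]
      | none => tl) []
    acc ++ temp_list) words_list

-- ===== PORT B =====
def words_extend_alt (words_list : List String) (nums : Int) : List String :=
  let cap : Int := min (words_list.length : Int) nums
  ((PySem.List.pyRange 2 (cap + 1) 1).foldl
    (fun st n =>
      let prev := List.zipWith (fun p w => p ++ w) st.1 (PySem.List.slice words_list (some (n - 1)) none)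
      (prev, st.2 ++ prev))
    (words_list, words_list)).2

-- ===== PRECONDITION & SPEC =====
def Spec_words_extend (words_list : List String) (nums : Int) (out : List String) : Prop := out = words_extend_alt words_list nums
instance (words_list : List String) (nums : Int) (out : List String) : Decidable (Spec_words_extend words_list nums out) := by unfold Spec_words_extend; infer_instance

-- ===== CLAIM (what is proved, stated in full; the proofs are below) =====
def Claim_equal_words_extend : Prop := ∀ (words_list : List String) (nums : Int), Dom_words_extend words_list nums → Spec_words_extend words_list nums (words_extend words_list nums)

-- ===== LEMMAS AND PROOFS =====

-- the concatenation l[i] ++ l[i+1] ++ … ++ l[i+n-1] (left-associated, as both programs build it)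
def pvCat (l : List String) (i n : Nat) : String :=
  ((l.drop (i + 1)).take (n - 1)).foldl (· ++ ·) (l.getD i "")

-- all windows of size n, in order of starting index
def pvWins (l : List String) (n : Nat) : List String :=
  (List.range (l.length + 1 - n)).map (fun i => pvCat l i n)

-- common reference: the original list followed by the windows of every size 2..cap
def pvRefI (l : List String) (cap : Int) : List String :=
  (PySem.List.pyRange 2 (cap + 1) 1).foldl (fun acc n => acc ++ pvWins l n.toNat) l

lemma pvCat_succ (l : List String) (i n : Nat) (h1 : 1 ≤ n) (h2 : i + n + 1 ≤ l.length) :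
    pvCat l i n ++ l.getD (i + n) "" = pvCat l i (n + 1) := by
  unfold pvCat
  have hn : n + 1 - 1 = (n - 1) + 1 := by omega
  rw [hn, List.take_add_one, List.foldl_append]
  have hidx : (l.drop (i + 1))[n - 1]? = some (l.getD (i + n) "") := by
    rw [List.getElem?_drop]
    have : i + 1 + (n - 1) = i + n := by omega
    rw [this, List.getElem?_eq_getElem (by omega)]
    simp [List.getD, List.getElem?_eq_getElem (show i + n < l.length by omega)]
  rw [hidx]
  simp

lemma pvWins_one (l : List String) : pvWins l 1 = l := by
  unfold pvWins pvCat
  apply List.ext_getElem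
  · simp
  · intro i h1 h2
    simp_all [List.getD]

-- the k-loop of A (over range(1, m)) with try/except semantics
lemma pvKloop (l : List String) (i m : Nat) (hi : i < l.length) (hm : 1 ≤ m) :
    (PySem.List.pyRange 1 (m : Int) 1).foldl
      (fun ow k => ow.bind (fun w => (PySem.List.pyGet? l ((i : Int) + k)).map (fun x => w ++ x)))
      (some (l.getD i "")) =
    if i + m ≤ l.length then some (pvCat l i m) else none := by
  induction m with
  | zero => omega
  | succ m ih =>
    rcases Nat.lt_or_ge 1 (m + 1) with h | h
    · have hm1 : 1 ≤ m := by omega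
      have hcast : ((m : Int) + 1) = ((m + 1 : Nat) : Int) := by push_cast; ring
      rw [← hcast, PySem.List.pyRange_one_succ_right (by exact_mod_cast hm1), List.foldl_append,
        ih hm1]
      by_cases hc : i + m ≤ l.length
      · rw [if_pos hc]
        simp only [List.foldl_cons, List.foldl_nil, Option.bind_some]
        by_cases hc2 : i + (m + 1) ≤ l.length
        · rw [if_pos hc2]
          have hg : PySem.List.pyGet? l ((i : Int) + (m : Int)) = some (l.getD (i + m) "") := by
            have : (i : Int) + (m : Int) = ((i + m : Nat) : Int) := by push_cast; ring
            rw [this, PySem.List.pyGet?_natCast, List.getElem?_eq_getElem (by omega)]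
            simp [List.getD, List.getElem?_eq_getElem (show i + m < l.length by omega)]
          rw [hg]
          simp only [Option.map_some, Option.some.injEq]
          exact pvCat_succ l i m hm1 (by omega)
        · rw [if_neg hc2]
          have hg : PySem.List.pyGet? l ((i : Int) + (m : Int)) = none := by
            have : (i : Int) + (m : Int) = ((i + m : Nat) : Int) := by push_cast; ring
            rw [this, PySem.List.pyGet?_natCast]
            simp; omega
          rw [hg]; rfl
      · rw [if_neg hc, if_neg (by omega)]
        rfl
    · have hm0 : m = 0 := by omega
      subst hm0
      rw [show ((1 : Nat) : Int) = 1 by rfl, PySem.List.pyRange_one_eq_nil le_rfl]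
      rw [if_pos (by omega)]
      simp [pvCat]

-- the i-loop of A produces exactly the windows of size m
lemma pvIloop (l : List String) (m : Nat) (h1 : 1 ≤ m) (h2 : m ≤ l.length) :
    (PySem.List.pyRange 0 (l.length : Int) 1).foldl (fun tl i =>
      match (PySem.List.pyGet? l i).bind (fun w0 =>
          (PySem.List.pyRange 1 (m : Int) 1).foldl
            (fun ow k => ow.bind (fun w => (PySem.List.pyGet? l (i + k)).map (fun x => w ++ x)))
            (some w0)) with
      | some w => tl ++ [w]
      | none => tl) [] = pvWins l m := by
  rw [PySem.List.pyRange_zero_nat, List.foldl_map]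
  have hstep : ∀ (tl : List String), ∀ i ∈ List.range l.length,
      (fun (tl : List String) (i : Nat) =>
        match (PySem.List.pyGet? l (i : Int)).bind (fun w0 =>
          (PySem.List.pyRange 1 (m : Int) 1).foldl
            (fun ow k => ow.bind (fun w => (PySem.List.pyGet? l ((i : Int) + k)).map (fun x => w ++ x)))
            (some w0)) with
        | some w => tl ++ [w]
        | none => tl) tl i
      = (fun (tl : List String) (i : Nat) => if i + m ≤ l.length then tl ++ [pvCat l i m] else tl) tl i := by
    intro tl i hi
    rw [List.mem_range] at hi
    have hget : PySem.List.pyGet? l (i : Int) = some (l.getD i "") := by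
      rw [PySem.List.pyGet?_natCast, List.getElem?_eq_getElem hi]
      simp [List.getD, List.getElem?_eq_getElem hi]
    simp only [hget, Option.bind_some, pvKloop l i m hi h1]
    by_cases hc : i + m ≤ l.length
    · rw [if_pos hc, if_pos hc]
    · rw [if_neg hc, if_neg hc]
  rw [PySem.List.foldl_congr_mem _ _ _ _ hstep]
  have hsplit : List.range l.length
      = List.range (l.length + 1 - m) ++ (List.range (m - 1)).map (fun i => l.length + 1 - m + i) := by
    rw [← List.range_add]
    congr 1
    omega
  rw [hsplit, List.foldl_append]
  have hfirst : (List.range (l.length + 1 - m)).foldl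
      (fun (tl : List String) i => if i + m ≤ l.length then tl ++ [pvCat l i m] else tl) [] = pvWins l m := by
    rw [PySem.List.foldl_congr_mem _ _ (fun tl i => tl ++ [pvCat l i m]) _ (by
      intro tl i hi
      rw [List.mem_range] at hi
      simp only [if_pos (show i + m ≤ l.length by omega)])]
    rw [PySem.List.foldl_append_singleton_eq_map]
    simp [pvWins]
  rw [hfirst, List.foldl_map]
  rw [PySem.List.foldl_congr_mem _ _ (fun tl _ => tl) _ (by
    intro tl i hi
    simp only [if_neg (show ¬ (l.length + 1 - m + i + m ≤ l.length) by omega)])]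
  simp

-- extending the size-c windows by one element gives the size-(c+1) windows
lemma pvZip (l : List String) (c : Nat) (h1 : 1 ≤ c) :
    List.zipWith (fun p w => p ++ w) (pvWins l c) (l.drop c) = pvWins l (c + 1) := by
  apply List.ext_getElem
  · simp [pvWins]; omega
  · intro i hi1 hi2
    simp only [List.getElem_zipWith, pvWins, List.getElem_map, List.getElem_range,
      List.getElem_drop]
    have hlen : i < l.length - c := by simp [pvWins] at hi1; omega
    have : l[c + i] = l.getD (i + c) "" := by
      rw [List.getD_eq_getElem _ _ (by omega)]
      congr 1
      omega
    rw [this]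
    exact pvCat_succ l i c h1 (by omega)

lemma words_extend_eq_ref (l : List String) (nums : Int) :
    words_extend l nums = pvRefI l (min (l.length : Int) nums) := by
  unfold words_extend pvRefI
  apply PySem.List.foldl_congr_mem
  intro acc n hn
  rw [PySem.List.mem_pyRange_one] at hn
  have hcap : n ≤ (l.length : Int) := le_trans (by omega) (min_le_left _ nums)
  have hn2 : (2 : Int) ≤ n := hn.1
  have hcast : n = ((n.toNat : Nat) : Int) := (Int.toNat_of_nonneg (by omega)).symm
  dsimp only []
  rw [show n.toNat = ((n : Int).toNat) from rfl]
  congr 1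
  rw [show PySem.List.pyRange 1 n 1 = PySem.List.pyRange 1 ((n.toNat : Nat) : Int) 1 from by rw [← hcast]]
  exact pvIloop l n.toNat (by omega) (by omega)

-- invariant of B's fold: after sizes 2..c, first = size-c windows, second = the reference
lemma pvBfold (l : List String) (c : Nat) (h1 : 1 ≤ c) :
    (PySem.List.pyRange 2 ((c : Int) + 1) 1).foldl
      (fun st n =>
        (List.zipWith (fun p w => p ++ w) st.1 (PySem.List.slice l (some (n - 1)) none),
          st.2 ++ List.zipWith (fun p w => p ++ w) st.1 (PySem.List.slice l (some (n - 1)) none)))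
      (l, l) = (pvWins l c, pvRefI l (c : Int)) := by
  induction c with
  | zero => omega
  | succ c ih =>
    rcases Nat.lt_or_ge 1 (c + 1) with h | h
    · have hc1 : 1 ≤ c := by omega
      have hcast : ((c : Int) + 1 + 1) = (((c + 1 : Nat) : Int) + 1) := by push_cast; ring
      have hrange : PySem.List.pyRange 2 (((c + 1 : Nat) : Int) + 1) 1
          = PySem.List.pyRange 2 ((c : Int) + 1) 1 ++ [(c : Int) + 1] := by
        rw [← hcast, PySem.List.pyRange_one_succ_right (by omega)]
      rw [hrange, List.foldl_append, ih hc1]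
      simp only [List.foldl_cons, List.foldl_nil]
      have hslice : PySem.List.slice l (some ((c : Int) + 1 - 1)) none = l.drop c := by
        rw [show (c : Int) + 1 - 1 = ((c : Nat) : Int) by ring]
        exact PySem.List.slice_from_natCast l c
      have hrefs : pvRefI l ((c + 1 : Nat) : Int)
          = pvRefI l (c : Int) ++ pvWins l (c + 1) := by
        unfold pvRefI
        rw [hrange, List.foldl_append, List.foldl_cons, List.foldl_nil,
          show ((c : Int) + 1).toNat = c + 1 by omega]
      rw [hslice, pvZip l c hc1, hrefs]
    · have hc0 : c = 0 := by omega
      subst hc0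
      rw [show ((1 : Nat) : Int) + 1 = 2 by rfl, PySem.List.pyRange_one_eq_nil le_rfl]
      rw [pvWins_one]
      unfold pvRefI
      rw [show ((1 : Nat) : Int) + 1 = 2 by rfl, PySem.List.pyRange_one_eq_nil le_rfl]
      rfl

lemma words_extend_alt_eq_ref (l : List String) (nums : Int) :
    words_extend_alt l nums = pvRefI l (min (l.length : Int) nums) := by
  unfold words_extend_alt
  dsimp only []
  by_cases h : min (l.length : Int) nums ≤ 1
  · rw [PySem.List.pyRange_one_eq_nil (by omega)]
    unfold pvRefI
    rw [PySem.List.pyRange_one_eq_nil (by omega)]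
    rfl
  · have hcast : min (l.length : Int) nums = (((min (l.length : Int) nums).toNat : Nat) : Int) :=
      (Int.toNat_of_nonneg (by omega)).symm
    rw [hcast, pvBfold l (min (l.length : Int) nums).toNat (by omega)]

-- ===== VERDICT (by name: the statement is the Claim_ definition above) =====
theorem words_extend_spec : Claim_equal_words_extend := by
  intro l nums _
  unfold Spec_words_extend
  rw [words_extend_eq_ref, words_extend_alt_eq_ref]
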